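-- pv_equiv track=rewrite | github.com/andrianiainafn/R.o.flot_max | flot_max_correct.py | build_residual_network
-- ===== SOURCE A (Python) =====
-- def build_residual_network(graph):
--     """Construit le réseau résiduel avec les arcs retour"""
--     residual = {}
--
--     # Copier le graphe original
--     for u in graph:
--         residual[u] = []
--         for v, cap in graph[u]:
--             residual[u].append((v, cap))
--
--     # Ajouter les arcs retour avec capacité 0
--     for u in graph:
--         for v, _ in graph[u]:
--             if v not in residual:
--                 residual[v] = []
--             # Vérifier si l'arc retour existe déjà
--             if not any(dest == u for dest, _ in residual[v]):
--                 residual[v].append((u, 0))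
--
--     return residual
-- ===== SOURCE B (Python) =====
-- def build_residual_network(graph):
--     """Construit le réseau résiduel avec les arcs retour"""
--     # Node-major construction: fix the node order first, then compute every
--     # node's adjacency row independently (original out-edges, then one zero-
--     # capacity reverse arc per predecessor that has no forward twin).
--     targets = [v for edges in graph.values() for v, _ in edges]
--     order = list(graph) + [v for v in dict.fromkeys(targets) if v not in graph]
--
--     def row(n):
--         out = list(graph.get(n, []))
--         dests = {v for v, _ in out}
--         back = [u for u, edges in graph.items()
--                 if u not in dests and any(v == n for v, _ in edges)]
--         return out + [(u, 0) for u in back]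
--
--     return {n: row(n) for n in order}
-- ===== Notes on version B (the rewrite author's own statement) =====
-- stated objective: alternative
-- what changed: B is node-major instead of A's edge-major second pass: it fixes the node order first (graph keys plus deduplicated targets), then computes each node's row independently by scanning the graph for predecessors, instead of A's per-edge mutation of residual[v] guarded by an any(...) scan over the partially built row.
import Mathlib
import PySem

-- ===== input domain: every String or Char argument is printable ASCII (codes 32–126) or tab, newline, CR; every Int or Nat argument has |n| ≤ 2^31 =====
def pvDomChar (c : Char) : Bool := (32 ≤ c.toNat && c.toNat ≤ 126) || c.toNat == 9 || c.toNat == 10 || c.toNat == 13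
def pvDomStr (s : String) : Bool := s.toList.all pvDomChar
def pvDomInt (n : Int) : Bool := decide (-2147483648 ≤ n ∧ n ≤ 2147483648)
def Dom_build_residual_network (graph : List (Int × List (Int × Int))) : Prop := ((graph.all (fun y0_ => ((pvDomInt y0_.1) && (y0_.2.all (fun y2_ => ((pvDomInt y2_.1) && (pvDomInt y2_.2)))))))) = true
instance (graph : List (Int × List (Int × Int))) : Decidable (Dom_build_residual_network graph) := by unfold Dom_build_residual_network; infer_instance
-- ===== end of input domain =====

-- B is node-major (fixed node order, each row computed independently from a per-node
-- predecessor scan) instead of A's edge-major mutating second pass: an alternative traversal.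


-- ===== PORT A =====
-- start from an empty residual dict, copy the graph, then for each edge (u,v) in edge order add the
-- reverse arc (u,0) to residual[v] unless residual[v] already holds an arc to u.
def build_residual_network (graph : List (Int × List (Int × Int))) : List (Int × List (Int × Int)) :=
  let residual : PySem.Dict Int (List (Int × Int)) := PySem.Dict.empty
  -- for u in graph: residual[u] = []; for v, cap in graph[u]: residual[u].append((v, cap))
  let residual := graph.foldl (fun r p =>
    let r := r.insert p.1 []
    p.2.foldl (fun r e => r.modify p.1 [] (fun l => l ++ [e])) r) residual
  -- for u in graph: for v, _ in graph[u]: …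
  let residual := graph.foldl (fun r p =>
    p.2.foldl (fun r e =>
      let r := if r.contains e.1 then r else r.insert e.1 []
      if (r.getD e.1 []).any (fun q => q.1 == p.1) then r
      else r.modify e.1 [] (fun l => l ++ [(p.1, (0 : Int))])) r) residual
  residual.items

-- ===== PORT B =====
-- row(n): original out-edges of n, then (u, 0) for each source u without a forward twin n→u
-- that has an edge to n (graph key order = first-encounter order of predecessors).
def pvRowB (graph : List (Int × List (Int × Int))) (n : Int) : List (Int × Int) :=
  let out := (PySem.Dict.mk graph).getD n []
  let dests := PySem.Set.ofList (out.map Prod.fst)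
  let back := (graph.filter (fun p =>
      !(PySem.Set.contains dests p.1) && p.2.any (fun e => e.1 == n))).map Prod.fst
  out ++ back.map (fun u => (u, (0 : Int)))

-- node-major: order = graph keys ++ deduplicated targets not already keys; then one row per node.
def build_residual_network_alt (graph : List (Int × List (Int × Int))) : List (Int × List (Int × Int)) :=
  let targets := graph.flatMap (fun p => p.2.map Prod.fst)
  let gkeys := graph.map Prod.fst
  let order := gkeys ++ (PySem.List.dedup targets).filter (fun v => !(gkeys.contains v))
  (order.foldl (fun d n => d.insert n (pvRowB graph n))
    (PySem.Dict.empty : PySem.Dict Int (List (Int × Int)))).items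

-- ===== PRECONDITION & SPEC =====
-- Pre_ only rules out association lists with a repeated key, which cannot arise from
-- A's Python argument (a dict); it excludes no input the Python function accepts.
def Pre_build_residual_network (graph : List (Int × List (Int × Int))) : Prop :=
  (graph.map Prod.fst).Nodup
instance (graph : List (Int × List (Int × Int))) : Decidable (Pre_build_residual_network graph) := by unfold Pre_build_residual_network; infer_instance
def pvWitness_build_residual_network : (List (Int × List (Int × Int))) :=
  [(0, [(1, 3), (2, 5)]), (1, [(0, 2)])]
def Spec_build_residual_network (graph : List (Int × List (Int × Int))) (out : List (Int × List (Int × Int))) : Prop := out = build_residual_network_alt graph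
instance (graph : List (Int × List (Int × Int))) (out : List (Int × List (Int × Int))) : Decidable (Spec_build_residual_network graph out) := by unfold Spec_build_residual_network; infer_instance

-- ===== CLAIM (what is proved, stated in full; the proofs are below) =====
def Claim_equal_build_residual_network : Prop := ∀ (graph : List (Int × List (Int × Int))), Dom_build_residual_network graph → Pre_build_residual_network graph → Spec_build_residual_network graph (build_residual_network graph)


-- ===== LEMMAS AND PROOFS =====

-- proof-side views of the two programs -----------------------------------------

/-- The edge stream A's second pass iterates over: (source, target) in order. -/
def pvEdges (graph : List (Int × List (Int × Int))) : List (Int × Int) :=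
  graph.flatMap (fun p => p.2.map (fun e => (p.1, e.1)))

/-- graph.get(n, []) as a first-match association lookup. -/
def pvBase (graph : List (Int × List (Int × Int))) (n : Int) : List (Int × Int) :=
  ((graph.find? (fun q => q.1 == n)).map Prod.snd).getD []

/-- A's first pass (copy of the graph) as a standalone dict. -/
def pvPhase1 (graph : List (Int × List (Int × Int))) : PySem.Dict Int (List (Int × Int)) :=
  graph.foldl (fun r p =>
    p.2.foldl (fun r e => r.modify p.1 [] (fun l => l ++ [e])) (r.insert p.1 [])) PySem.Dict.empty

/-- A's second-pass body, one edge at a time. -/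
def pvAstep (r : PySem.Dict Int (List (Int × Int))) (uv : Int × Int) :
    PySem.Dict Int (List (Int × Int)) :=
  let r := if r.contains uv.2 then r else r.insert uv.2 []
  if (r.getD uv.2 []).any (fun q => q.1 == uv.1) then r
  else r.modify uv.2 [] (fun l => l ++ [(uv.1, (0 : Int))])

/-- New nodes (targets not already keys) in first-encounter order, A's view. -/
def pvNew (keys0 : List Int) (P : List (Int × Int)) : List Int :=
  P.foldl (fun acc uv => if uv.2 ∈ keys0 ∨ uv.2 ∈ acc then acc else acc ++ [uv.2]) []

/-- Reverse arcs accumulated by A at node n after the edge prefix P. -/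
def pvRev (graph : List (Int × List (Int × Int))) (P : List (Int × Int)) (n : Int) :
    List (Int × Int) :=
  P.foldl (fun acc uv =>
    if uv.2 = n ∧ ((pvBase graph n ++ acc).any (fun q => q.1 == uv.1)) = false
    then acc ++ [(uv.1, (0 : Int))] else acc) []

/-- The predecessor-collecting step (dedupe on insertion), for a fixed node n. -/
def pvPstep (n : Int) (acc : List Int) (uv : Int × Int) : List Int :=
  if uv.2 = n ∧ uv.1 ∉ acc then acc ++ [uv.1] else acc

/-- Distinct predecessors of n in first-encounter order. -/
def pvPredsL (P : List (Int × Int)) (n : Int) : List Int :=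
  P.foldl (pvPstep n) []

/-- All targets in first-encounter order. -/
def pvKeysP (P : List (Int × Int)) : List Int :=
  P.foldl (fun acc uv => if uv.2 ∈ acc then acc else acc ++ [uv.2]) []

-- generic bridge: the nested source loops are a fold over the edge stream -------

theorem pv_foldl_pairs {sigma : Type} (f : sigma → Int × Int → sigma)
    (graph : List (Int × List (Int × Int))) (init : sigma) :
    graph.foldl (fun st p => p.2.foldl (fun st e => f st (p.1, e.1)) st) init
      = (pvEdges graph).foldl f init := by
  induction graph generalizing init with
  | nil => rfl
  | cons p gs ih =>
    simp only [List.foldl_cons, pvEdges, List.flatMap_cons, List.foldl_append, List.foldl_map]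
    exact ih _

-- one-step unfoldings of the accumulator folds --------------------------------

theorem pvPredsL_append (P : List (Int × Int)) (uv : Int × Int) (n : Int) :
    pvPredsL (P ++ [uv]) n
      = if uv.2 = n ∧ uv.1 ∉ pvPredsL P n then pvPredsL P n ++ [uv.1] else pvPredsL P n := by
  simp [pvPredsL, pvPstep, List.foldl_append]

theorem pvKeysP_append (P : List (Int × Int)) (uv : Int × Int) :
    pvKeysP (P ++ [uv])
      = if uv.2 ∈ pvKeysP P then pvKeysP P else pvKeysP P ++ [uv.2] := by
  simp [pvKeysP, List.foldl_append]

theorem pvNew_append (keys0 : List Int) (P : List (Int × Int)) (uv : Int × Int) :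
    pvNew keys0 (P ++ [uv])
      = if uv.2 ∈ keys0 ∨ uv.2 ∈ pvNew keys0 P then pvNew keys0 P
        else pvNew keys0 P ++ [uv.2] := by
  simp [pvNew, List.foldl_append]

theorem pvRev_append (graph : List (Int × List (Int × Int))) (P : List (Int × Int))
    (uv : Int × Int) (n : Int) :
    pvRev graph (P ++ [uv]) n
      = if uv.2 = n ∧ ((pvBase graph n ++ pvRev graph P n).any (fun q => q.1 == uv.1)) = false
        then pvRev graph P n ++ [(uv.1, (0 : Int))] else pvRev graph P n := by
  simp [pvRev, List.foldl_append]

-- membership facts ---------------------------------------------------------------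

theorem pv_mem_keysP (P : List (Int × Int)) (v : Int) :
    v ∈ pvKeysP P ↔ ∃ u, (u, v) ∈ P := by
  induction P using List.reverseRecOn with
  | nil => simp [pvKeysP]
  | append_singleton P uv ih =>
    rw [pvKeysP_append]
    simp only [List.mem_append, List.mem_singleton]
    by_cases h1 : uv.2 ∈ pvKeysP P
    · rw [if_pos h1]
      rw [ih]
      constructor
      · rintro ⟨u, hu⟩; exact ⟨u, Or.inl hu⟩
      · rintro ⟨u, hu | h⟩
        · exact ⟨u, hu⟩
        · cases h; exact ih.mp h1
    · rw [if_neg h1]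
      simp only [List.mem_append, List.mem_singleton, ih]
      constructor
      · rintro (⟨u, hu⟩ | rfl)
        · exact ⟨u, Or.inl hu⟩
        · exact ⟨uv.1, Or.inr rfl⟩
      · rintro ⟨u, hu | h⟩
        · exact Or.inl ⟨u, hu⟩
        · cases h; right; rfl

theorem pv_mem_new (keys0 : List Int) (P : List (Int × Int)) (v : Int) :
    v ∈ pvNew keys0 P ↔ v ∉ keys0 ∧ ∃ u, (u, v) ∈ P := by
  induction P using List.reverseRecOn with
  | nil => simp [pvNew]
  | append_singleton P uv ih =>
    rw [pvNew_append]
    simp only [List.mem_append, List.mem_singleton]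
    by_cases h1 : uv.2 ∈ keys0 ∨ uv.2 ∈ pvNew keys0 P
    · rw [if_pos h1]
      rw [ih]
      constructor
      · rintro ⟨hk, u, hu⟩; exact ⟨hk, u, Or.inl hu⟩
      · rintro ⟨hk, u, hu | h⟩
        · exact ⟨hk, u, hu⟩
        · cases h
          rcases h1 with h | h
          · exact absurd h hk
          · exact ih.mp h
    · rw [if_neg h1]
      push Not at h1
      simp only [List.mem_append, List.mem_singleton, ih]
      constructor
      · rintro (⟨hk, u, hu⟩ | rfl)
        · exact ⟨hk, u, Or.inl hu⟩
        · exact ⟨h1.1, uv.1, Or.inr rfl⟩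
      · rintro ⟨hk, u, hu | h⟩
        · exact Or.inl ⟨hk, u, hu⟩
        · cases h; right; rfl

theorem pv_base_of_not_mem (graph : List (Int × List (Int × Int))) (n : Int)
    (h : n ∉ graph.map Prod.fst) : pvBase graph n = [] := by
  have : graph.find? (fun q => q.1 == n) = none := by
    rw [List.find?_eq_none]
    intro q hq hbeq
    exact h (List.mem_map.mpr ⟨q, hq, by simpa using hbeq⟩)
  simp [pvBase, this]

/-- Under unique keys the original arcs out of n are exactly the targets of base n. -/
theorem pv_base_eq_mk (graph : List (Int × List (Int × Int))) (n : Int) :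
    (PySem.Dict.mk graph).getD n [] = pvBase graph n := by
  induction graph with
  | nil => rfl
  | cons p gs ih =>
    rw [PySem.Dict.getD_eq_get?_getD, PySem.Dict.get?_mk_cons]
    cases hb : (p.1 == n) with
    | true => simp [pvBase, hb]
    | false =>
      rw [if_neg (by simp), ← PySem.Dict.getD_eq_get?_getD, ih]
      simp [pvBase, hb]

theorem pv_any_fst (l : List (Int × Int)) (u : Int) :
    (l.any (fun q => q.1 == u)) = true ↔ u ∈ l.map Prod.fst := by
  simp only [List.any_eq_true, beq_iff_eq, List.mem_map]

-- phase 1 of A --------------------------------------------------------------------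

theorem pv_modify_loop (es : List (Int × Int)) (k : Int)
    (d : PySem.Dict Int (List (Int × Int))) (hk : d.contains k = true) :
    (es.foldl (fun r e => r.modify k [] (fun l => l ++ [e])) d).keys = d.keys
    ∧ ∀ n, (es.foldl (fun r e => r.modify k [] (fun l => l ++ [e])) d).getD n []
        = if n = k then d.getD k [] ++ es else d.getD n [] := by
  induction es generalizing d with
  | nil => exact ⟨rfl, fun n => by rcases eq_or_ne n k with rfl | hn <;> simp [*]⟩
  | cons e es ih =>
    have hk' : (d.modify k [] (fun l => l ++ [e])).contains k = true := by
      rw [PySem.Dict.contains_modify]; simp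
    obtain ⟨hkeys, hget⟩ := ih (d.modify k [] (fun l => l ++ [e])) hk'
    refine ⟨?_, ?_⟩
    · rw [List.foldl_cons, hkeys, PySem.Dict.keys_modify,
        PySem.Dict.keys_insert_of_contains _ _ hk]
    · intro n
      rw [List.foldl_cons, hget n, PySem.Dict.getD_modify]
      by_cases hn : n = k
      · cases hn; simp
      · simp [PySem.Dict.getD_modify, hn]

theorem pv_phase1_char (graph : List (Int × List (Int × Int)))
    (hnd : (graph.map Prod.fst).Nodup) :
    (pvPhase1 graph).keys = graph.map Prod.fst
    ∧ ∀ n, (pvPhase1 graph).getD n [] = pvBase graph n := by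
  induction graph using List.reverseRecOn with
  | nil => exact ⟨by simp [pvPhase1], fun n => by simp [pvPhase1, pvBase]⟩
  | append_singleton gs p ih =>
    have hnd' : (gs.map Prod.fst).Nodup := by
      simpa using (List.nodup_append.mp (by simpa using hnd)).1
    have hp1 : p.1 ∉ gs.map Prod.fst := by
      have := List.nodup_append.mp (by simpa using hnd)
      intro hmem
      exact this.2.2 p.1 hmem p.1 (by simp) rfl
    obtain ⟨ihk, ihg⟩ := ih hnd'
    have hstep : pvPhase1 (gs ++ [p])
        = p.2.foldl (fun r e => r.modify p.1 [] (fun l => l ++ [e]))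
            ((pvPhase1 gs).insert p.1 []) := by
      simp [pvPhase1, List.foldl_append]
    have hcont : (pvPhase1 gs).contains p.1 = false := by
      rw [PySem.Dict.contains_eq_decide_mem_keys, ihk]
      simpa using hp1
    have hcont' : ((pvPhase1 gs).insert p.1 []).contains p.1 = true := by
      rw [PySem.Dict.contains_insert]; simp
    obtain ⟨hlk, hlg⟩ := pv_modify_loop p.2 p.1 ((pvPhase1 gs).insert p.1 []) hcont'
    constructor
    · rw [hstep, hlk, PySem.Dict.keys_insert_of_not_contains _ _ hcont, ihk, List.map_append]
      rfl
    · intro n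
      rw [hstep, hlg n]
      by_cases hn : n = p.1
      · cases hn
        rw [if_pos rfl, PySem.Dict.getD_insert]
        have hfind : gs.find? (fun q => q.1 == p.1) = none := by
          rw [List.find?_eq_none]
          intro q hq hbeq
          exact hp1 (List.mem_map.mpr ⟨q, hq, by simpa using hbeq⟩)
        simp [pvBase, List.find?_append, hfind]
      · have hne : (p.1 == n) = false := by simpa using fun h => hn h.symm
        rw [if_neg hn, PySem.Dict.getD_insert, if_neg hn, ihg n]
        simp [pvBase, List.find?_append, hne]

-- phase 2 invariant (A) ------------------------------------------------------------

theorem pv_rev_of_no_target (graph : List (Int × List (Int × Int))) (P : List (Int × Int))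
    (n : Int) (h : ∀ uv ∈ P, uv.2 ≠ n) : pvRev graph P n = [] := by
  induction P using List.reverseRecOn with
  | nil => simp [pvRev]
  | append_singleton P uv ih =>
    have h' : ∀ w ∈ P, w.2 ≠ n := fun w hw => h w (List.mem_append_left _ hw)
    rw [pvRev_append, ih h']
    have : uv.2 ≠ n := h uv (List.mem_append_right _ (by simp))
    simp [this]

theorem pv_phase2_inv (graph : List (Int × List (Int × Int)))
    (hnd : (graph.map Prod.fst).Nodup) (P : List (Int × Int)) :
    (P.foldl pvAstep (pvPhase1 graph)).keys
        = graph.map Prod.fst ++ pvNew (graph.map Prod.fst) P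
    ∧ ∀ n, (P.foldl pvAstep (pvPhase1 graph)).getD n []
        = pvBase graph n ++ pvRev graph P n := by
  induction P using List.reverseRecOn with
  | nil =>
    obtain ⟨hk, hg⟩ := pv_phase1_char graph hnd
    exact ⟨by simpa [pvNew] using hk, fun n => by simpa [pvRev] using hg n⟩
  | append_singleton P uv ih =>
    obtain ⟨ihk, ihg⟩ := ih
    rw [List.foldl_append, List.foldl_cons, List.foldl_nil]
    set d := P.foldl pvAstep (pvPhase1 graph) with hd
    by_cases hv : uv.2 ∈ graph.map Prod.fst ∨ uv.2 ∈ pvNew (graph.map Prod.fst) P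
    · have hcont : d.contains uv.2 = true := by
        rw [PySem.Dict.contains_eq_decide_mem_keys, ihk]
        simpa using hv
      by_cases hany : ((pvBase graph uv.2 ++ pvRev graph P uv.2).any (fun q => q.1 == uv.1)) = true
      · have hstep : pvAstep d uv = d := by
          unfold pvAstep
          rw [if_pos hcont, if_pos (by rw [ihg uv.2]; exact hany)]
        rw [hstep]
        constructor
        · rw [ihk, pvNew_append, if_pos hv]
        · intro n
          rw [ihg n, pvRev_append]
          rcases eq_or_ne uv.2 n with rfl | hn
          · rw [if_neg (by rintro ⟨-, hc⟩; rw [hany] at hc; simp at hc)]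
          · rw [if_neg (by simp [hn])]
      · have hstep : pvAstep d uv = d.modify uv.2 [] (fun l => l ++ [(uv.1, (0 : Int))]) := by
          unfold pvAstep
          rw [if_pos hcont, if_neg (by rw [ihg uv.2]; exact hany)]
        rw [hstep]
        constructor
        · rw [PySem.Dict.keys_modify, PySem.Dict.keys_insert_of_contains _ _ hcont, ihk,
            pvNew_append, if_pos hv]
        · intro n
          rw [PySem.Dict.getD_modify, pvRev_append]
          rcases eq_or_ne n uv.2 with rfl | hn
          · rw [if_pos rfl, ihg uv.2, if_pos ⟨rfl, Bool.eq_false_iff.mpr hany⟩, List.append_assoc]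
          · rw [if_neg hn, ihg n, if_neg (by rintro ⟨h, -⟩; exact hn h.symm)]
    · have hcont : d.contains uv.2 = false := by
        rw [PySem.Dict.contains_eq_decide_mem_keys, ihk]
        simpa using hv
      push Not at hv
      have hbase : pvBase graph uv.2 = [] := by
        apply pv_base_of_not_mem
        exact hv.1
      have hrev : pvRev graph P uv.2 = [] := by
        apply pv_rev_of_no_target
        intro w hw he
        exact hv.2 ((pv_mem_new _ P uv.2).mpr ⟨hv.1, w.1, by rw [← he]; exact hw⟩)
      have hgetnew : ((d.insert uv.2 []).getD uv.2 []) = [] := by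
        rw [PySem.Dict.getD_insert, if_pos rfl]
      have hstep : pvAstep d uv
          = (d.insert uv.2 []).modify uv.2 [] (fun l => l ++ [(uv.1, (0 : Int))]) := by
        unfold pvAstep
        rw [hcont]
        simp only [Bool.false_eq_true, if_false]
        rw [if_neg (by rw [hgetnew]; simp)]
      rw [hstep]
      have hcont' : (d.insert uv.2 []).contains uv.2 = true := by
        rw [PySem.Dict.contains_insert]; simp
      constructor
      · rw [PySem.Dict.keys_modify, PySem.Dict.keys_insert_of_contains _ _ hcont',
          PySem.Dict.keys_insert_of_not_contains _ _ hcont, ihk, pvNew_append,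
          if_neg (not_or.mpr hv), List.append_assoc]
      · intro n
        rw [PySem.Dict.getD_modify, pvRev_append]
        rcases eq_or_ne n uv.2 with rfl | hn
        · simp [hgetnew, hbase, hrev]
        · rw [if_neg hn, PySem.Dict.getD_insert, if_neg hn, ihg n,
            if_neg (by rintro ⟨h, -⟩; exact hn h.symm)]

theorem pv_new_nodup (keys0 : List Int) (P : List (Int × Int)) (h0 : keys0.Nodup) :
    (keys0 ++ pvNew keys0 P).Nodup := by
  have key : ∀ P : List (Int × Int), (pvNew keys0 P).Nodup := by
    intro P
    induction P using List.reverseRecOn with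
    | nil => simp [pvNew]
    | append_singleton P uv ih =>
      rw [pvNew_append]
      by_cases h1 : uv.2 ∈ keys0 ∨ uv.2 ∈ pvNew keys0 P
      · rw [if_pos h1]; exact ih
      · rw [if_neg h1]
        push Not at h1
        exact List.Nodup.append ih (by simp) (by simpa using h1.2)
  rw [List.nodup_append]
  refine ⟨h0, key P, ?_⟩
  intro a ha b hb
  rcases (pv_mem_new keys0 P b).mp hb with ⟨hbk, _⟩
  intro h; cases h; exact hbk ha

/-- A's result, characterised. -/
theorem pvA_char (graph : List (Int × List (Int × Int)))
    (hnd : (graph.map Prod.fst).Nodup) :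
    build_residual_network graph
      = (graph.map Prod.fst ++ pvNew (graph.map Prod.fst) (pvEdges graph)).map
          (fun n => (n, pvBase graph n ++ pvRev graph (pvEdges graph) n)) := by
  have e0 : build_residual_network graph
      = ((graph.foldl (fun r p => p.2.foldl (fun r e => pvAstep r (p.1, e.1)) r)
            (pvPhase1 graph))).items := rfl
  rw [e0, pv_foldl_pairs pvAstep]
  obtain ⟨hk, hg⟩ := pv_phase2_inv graph hnd (pvEdges graph)
  rw [PySem.Dict.items_eq_map_keys _ (by rw [hk]; exact pv_new_nodup _ _ hnd) [], hk]
  exact List.map_congr_left (fun n _ => by rw [hg n])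

-- joining pvNew / pvKeysP to B's dedup -----------------------------------------

theorem pv_new_eq_filter (keys0 : List Int) (P : List (Int × Int)) :
    pvNew keys0 P = (pvKeysP P).filter (fun v => !(keys0.contains v)) := by
  induction P using List.reverseRecOn with
  | nil => simp [pvNew, pvKeysP]
  | append_singleton P uv ih =>
    rw [pvNew_append, pvKeysP_append]
    by_cases hk : uv.2 ∈ pvKeysP P
    · rw [if_pos hk]
      by_cases h0 : uv.2 ∈ keys0
      · rw [if_pos (Or.inl h0), ih]
      · rw [if_pos (Or.inr ((pv_mem_new _ _ _).mpr ⟨h0, (pv_mem_keysP P uv.2).mp hk⟩)), ih]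
    · rw [if_neg hk]
      by_cases h0 : uv.2 ∈ keys0
      · rw [if_pos (Or.inl h0), ih, List.filter_append]
        simp [h0]
      · have hnew : uv.2 ∉ pvNew keys0 P := fun h =>
          hk ((pv_mem_keysP P uv.2).mpr ((pv_mem_new keys0 P uv.2).mp h).2)
        rw [if_neg (by rintro (h | h); exacts [h0 h, hnew h]), ih, List.filter_append]
        simp [h0]

/-- First-encounter dedup of the target stream is set(ofList) of the targets. -/
theorem pv_keysP_eq_ofList (P : List (Int × Int)) :
    pvKeysP P = PySem.Set.ofList (P.map Prod.snd) := by
  induction P using List.reverseRecOn with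
  | nil => rfl
  | append_singleton P uv ih =>
    rw [pvKeysP_append, List.map_append, List.map_cons, List.map_nil,
      PySem.Set.ofList_append_singleton, ← ih, PySem.Set.add]
    by_cases hk : uv.2 ∈ pvKeysP P
    · rw [if_pos hk, if_pos (by simpa [PySem.Set.contains] using hk)]
    · rw [if_neg hk, if_neg (by simpa [PySem.Set.contains] using hk)]

-- A's reverse-arc list as a filtered predecessor list --------------------------

theorem pv_rev_eq_filter (graph : List (Int × List (Int × Int))) (P : List (Int × Int))
    (n : Int) :
    pvRev graph P n
      = ((pvPredsL P n).filter
            (fun u => !(decide (u ∈ (pvBase graph n).map Prod.fst)))).map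
          (fun u => (u, (0 : Int))) := by
  induction P using List.reverseRecOn with
  | nil => simp [pvRev, pvPredsL]
  | append_singleton P uv ih =>
    rw [pvRev_append, pvPredsL_append]
    by_cases hn : uv.2 = n
    · cases hn
      have hfst : (pvRev graph P uv.2).map Prod.fst
          = (pvPredsL P uv.2).filter
              (fun u => !(decide (u ∈ (pvBase graph uv.2).map Prod.fst))) := by
        rw [ih, List.map_map]
        exact List.map_id _
      by_cases hd : uv.1 ∈ (pvBase graph uv.2).map Prod.fst
      · have hany : ((pvBase graph uv.2 ++ pvRev graph P uv.2).any
            (fun q => q.1 == uv.1)) = true := by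
          rw [List.any_append, Bool.or_eq_true]
          exact Or.inl ((pv_any_fst _ _).mpr hd)
        rw [if_neg (by rintro ⟨-, hc⟩; rw [hany] at hc; simp at hc)]
        by_cases hp : uv.1 ∈ pvPredsL P uv.2
        · rw [if_neg (by simp [hp])]; exact ih
        · rw [if_pos ⟨rfl, hp⟩, List.filter_append, ih]
          simp [hd]
      · by_cases hp : uv.1 ∈ pvPredsL P uv.2
        · have hany : ((pvBase graph uv.2 ++ pvRev graph P uv.2).any
              (fun q => q.1 == uv.1)) = true := by
            rw [List.any_append, Bool.or_eq_true]
            refine Or.inr ((pv_any_fst _ _).mpr ?_)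
            rw [hfst]
            exact List.mem_filter.mpr ⟨hp, by simpa using hd⟩
          rw [if_neg (by rintro ⟨-, hc⟩; rw [hany] at hc; simp at hc),
            if_neg (by simp [hp])]
          exact ih
        · have hany : ((pvBase graph uv.2 ++ pvRev graph P uv.2).any
              (fun q => q.1 == uv.1)) = false := by
            rw [List.any_append, Bool.or_eq_false_iff]
            constructor
            · exact Bool.eq_false_iff.mpr (fun hc => hd ((pv_any_fst _ _).mp hc))
            · refine Bool.eq_false_iff.mpr (fun hc => ?_)
              have := (pv_any_fst _ _).mp hc
              rw [hfst] at this
              exact hp (List.mem_filter.mp this).1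
          rw [if_pos ⟨rfl, hany⟩, if_pos ⟨rfl, hp⟩, List.filter_append, ih]
          simp [hd]
    · rw [if_neg (by simp [hn]), if_neg (by simp [hn])]
      exact ih

-- the predecessor list is graph key order (B's per-node scan) -------------------

theorem pv_predsAux_all_mem (n : Int) (E : List (Int × Int)) (acc : List Int)
    (h : ∀ uv ∈ E, uv.1 ∈ acc) : E.foldl (pvPstep n) acc = acc := by
  induction E generalizing acc with
  | nil => rfl
  | cons uv E ih =>
    rw [List.foldl_cons]
    have hm : uv.1 ∈ acc := h uv (by simp)
    rw [show pvPstep n acc uv = acc by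
      unfold pvPstep; rw [if_neg (by rintro ⟨-, hc⟩; exact hc hm)]]
    exact ih acc (fun w hw => h w (by simp [hw]))

theorem pv_predsAux_disjoint (n : Int) (E : List (Int × Int)) (acc₁ acc₂ : List Int)
    (h : ∀ uv ∈ E, uv.1 ∉ acc₁) :
    E.foldl (pvPstep n) (acc₁ ++ acc₂) = acc₁ ++ E.foldl (pvPstep n) acc₂ := by
  induction E generalizing acc₂ with
  | nil => rfl
  | cons uv E ih =>
    have h1 : uv.1 ∉ acc₁ := h uv (by simp)
    have ht : ∀ w ∈ E, w.1 ∉ acc₁ := fun w hw => h w (by simp [hw])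
    rw [List.foldl_cons, List.foldl_cons]
    have hstep : pvPstep n (acc₁ ++ acc₂) uv = acc₁ ++ pvPstep n acc₂ uv := by
      unfold pvPstep
      by_cases h2 : uv.2 = n ∧ uv.1 ∉ acc₂
      · rw [if_pos ⟨h2.1, by simp [h1, h2.2]⟩, if_pos h2, List.append_assoc]
      · rw [if_neg (by
          rintro ⟨he, hc⟩
          exact h2 ⟨he, fun hm => hc (List.mem_append_right _ hm)⟩), if_neg h2]
    rw [hstep, ih (pvPstep n acc₂ uv) ht]

theorem pv_preds_block (n : Int) (p : Int × List (Int × Int)) :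
    (p.2.map (fun e => (p.1, e.1))).foldl (pvPstep n) []
      = if p.2.any (fun e => e.1 == n) then [p.1] else [] := by
  induction p.2 with
  | nil => rfl
  | cons e es ih =>
    rw [List.map_cons, List.foldl_cons, List.any_cons]
    by_cases he : e.1 = n
    · rw [show pvPstep n [] (p.1, e.1) = [p.1] by
        unfold pvPstep; rw [if_pos ⟨he, by simp⟩]; rfl]
      rw [pv_predsAux_all_mem n _ [p.1] (by
        intro uv hm
        rcases List.mem_map.mp hm with ⟨e', -, rfl⟩
        simp)]
      simp [he]
    · rw [show pvPstep n [] (p.1, e.1) = [] by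
        unfold pvPstep; rw [if_neg (by rintro ⟨hc, -⟩; exact he hc)]]
      rw [ih]
      have hbe : (e.1 == n) = false := by simpa using he
      rw [hbe, Bool.false_or]

theorem pv_predsL_eq_filter_map (graph : List (Int × List (Int × Int)))
    (hnd : (graph.map Prod.fst).Nodup) (n : Int) :
    pvPredsL (pvEdges graph) n
      = (graph.filter (fun p => p.2.any (fun e => e.1 == n))).map Prod.fst := by
  induction graph with
  | nil => rfl
  | cons p gs ih =>
    simp only [List.map_cons, List.nodup_cons] at hnd
    have hblock := pv_preds_block n p
    have hdisj : ∀ uv ∈ pvEdges gs,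
        uv.1 ∉ (if p.2.any (fun e => e.1 == n) then [p.1] else []) := by
      intro uv hm
      have hsrc : uv.1 ∈ gs.map Prod.fst := by
        rcases (List.mem_flatMap.mp hm) with ⟨q, hq, hm'⟩
        rcases List.mem_map.mp hm' with ⟨e, -, rfl⟩
        exact List.mem_map.mpr ⟨q, hq, rfl⟩
      split
      · simp only [List.mem_singleton]
        intro heq
        rw [heq] at hsrc
        exact hnd.1 hsrc
      · simp
    have hE : pvEdges (p :: gs) = p.2.map (fun e => (p.1, e.1)) ++ pvEdges gs := by
      simp [pvEdges]
    rw [pvPredsL, hE, List.foldl_append]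
    rw [show (p.2.map (fun e => (p.1, e.1))).foldl (pvPstep n) []
        = (if p.2.any (fun e => e.1 == n) then [p.1] else []) ++ [] from by
      rw [hblock]; simp]
    rw [pv_predsAux_disjoint n (pvEdges gs) _ [] hdisj]
    rw [show (pvEdges gs).foldl (pvPstep n) [] = pvPredsL (pvEdges gs) n from rfl, ih hnd.2]
    by_cases hany : p.2.any (fun e => e.1 == n) = true
    · simp [hany]
    · simp [hany]

-- B, characterised ---------------------------------------------------------------

theorem pvB_char (graph : List (Int × List (Int × Int)))
    (hnd : (graph.map Prod.fst).Nodup) :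
    build_residual_network_alt graph
      = (graph.map Prod.fst
          ++ (PySem.List.dedup (graph.flatMap (fun p => p.2.map Prod.fst))).filter
              (fun v => !((graph.map Prod.fst).contains v))).map
          (fun n => (n, pvRowB graph n)) := by
  have hnodup : (graph.map Prod.fst
      ++ (PySem.List.dedup (graph.flatMap (fun p => p.2.map Prod.fst))).filter
          (fun v => !((graph.map Prod.fst).contains v))).Nodup := by
    refine List.Nodup.append hnd ((PySem.List.nodup_dedup _).filter _) ?_
    intro a ha hb
    have := (List.mem_filter.mp hb).2
    simp only [Bool.not_eq_true'] at this
    rw [List.contains_eq_any_beq] at this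
    simp only [List.any_eq_false, beq_iff_eq] at this
    exact this a ha rfl
  have e0 : build_residual_network_alt graph
      = ((graph.map Prod.fst
          ++ (PySem.List.dedup (graph.flatMap (fun p => p.2.map Prod.fst))).filter
              (fun v => !((graph.map Prod.fst).contains v))).foldl
          (fun d a => d.insert ((fun n => n) a) ((fun n => pvRowB graph n) a))
          (PySem.Dict.empty : PySem.Dict Int (List (Int × Int)))).items := rfl
  rw [e0, PySem.Dict.items_foldl_insert_fresh _ (fun n => n) (fun n => pvRowB graph n) _
    (fun a _ => PySem.Dict.contains_empty a) (by simpa using hnodup)]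
  simp [PySem.Dict.empty]

-- ===== VERDICT (by name: the statement is the Claim_ definition above) =====
theorem build_residual_network_spec : Claim_equal_build_residual_network := by
  intro graph _hdom hnd
  unfold Spec_build_residual_network
  rw [pvA_char graph hnd, pvB_char graph hnd]
  have horder : pvNew (graph.map Prod.fst) (pvEdges graph)
      = (PySem.List.dedup (graph.flatMap (fun p => p.2.map Prod.fst))).filter
          (fun v => !((graph.map Prod.fst).contains v)) := by
    rw [pv_new_eq_filter, pv_keysP_eq_ofList, PySem.List.dedup_eq_ofList]
    congr 1
    simp [pvEdges, List.map_flatMap, Function.comp_def]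
  rw [← horder]
  refine List.map_congr_left (fun n _ => ?_)
  -- rows agree: pvRowB n = base n ++ pvRev n
  unfold pvRowB
  rw [pv_base_eq_mk, pv_rev_eq_filter graph (pvEdges graph) n]
  refine congrArg (fun l => (n, pvBase graph n ++ l)) (congrArg _ ?_)
  -- back = filtered predecessor list
  have hsplit : graph.filter (fun p =>
        !(PySem.Set.contains (PySem.Set.ofList ((pvBase graph n).map Prod.fst)) p.1)
          && p.2.any (fun e => e.1 == n))
      = (graph.filter (fun p => p.2.any (fun e => e.1 == n))).filter
          (fun p => !(decide (p.1 ∈ (pvBase graph n).map Prod.fst))) := by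
    rw [List.filter_filter]
    refine List.filter_congr (fun p _ => ?_)
    have hd : decide (p.1 ∈ PySem.Set.ofList ((pvBase graph n).map Prod.fst))
        = decide (p.1 ∈ (pvBase graph n).map Prod.fst) :=
      decide_eq_decide.mpr (PySem.Set.mem_ofList ((pvBase graph n).map Prod.fst) p.1)
    simp [PySem.Set.contains, hd]
  have hfm : ((graph.filter (fun p => p.2.any (fun e => e.1 == n))).filter
        (fun p => !(decide (p.1 ∈ (pvBase graph n).map Prod.fst)))).map Prod.fst
      = ((graph.filter (fun p => p.2.any (fun e => e.1 == n))).map Prod.fst).filter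
        (fun u => !(decide (u ∈ (pvBase graph n).map Prod.fst))) := by
    rw [List.filter_map]
    rfl
  rw [hsplit, hfm, pv_predsL_eq_filter_map graph hnd n]
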